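-- pv_equiv track=rewrite | github.com/qwerty7878/Algorithm | 프로그래머스/0/181887. 홀수 vs 짝수/홀수 vs 짝수.py | solution
-- ===== SOURCE A (Python) =====
-- def solution(num_list):
--     even,odd = 0,0
--     for i in range(0, len(num_list)):
--         if i % 2 == 0:
--             even += num_list[i]
--         else:
--             odd += num_list[i]
--
--     if even >= odd:
--         return even
--     else:
--         return odd
-- ===== SOURCE B (Python) =====
-- def solution(num_list):
--     even = sum(num_list[::2])
--     odd = sum(num_list[1::2])
--     return max(even, odd)
-- ===== Notes on version B (the rewrite author's own statement) =====
-- stated objective: idiomatic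
-- what changed: Replaces the explicit index loop with its i % 2 parity branch by two strided slices summed separately (num_list[::2] and num_list[1::2]) and a max(); the per-element work moves from interpreted bytecode into C-level slice/sum.
import Mathlib
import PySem

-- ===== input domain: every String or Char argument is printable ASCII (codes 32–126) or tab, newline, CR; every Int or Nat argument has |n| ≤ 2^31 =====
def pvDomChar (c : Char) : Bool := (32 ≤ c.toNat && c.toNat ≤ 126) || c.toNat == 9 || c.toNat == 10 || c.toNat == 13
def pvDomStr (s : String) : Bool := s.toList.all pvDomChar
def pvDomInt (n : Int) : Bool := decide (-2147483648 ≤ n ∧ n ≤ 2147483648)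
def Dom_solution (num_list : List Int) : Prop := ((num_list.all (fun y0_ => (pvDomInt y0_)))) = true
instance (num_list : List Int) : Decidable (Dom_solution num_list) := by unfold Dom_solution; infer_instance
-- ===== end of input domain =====

-- B replaces A's index loop with its parity branch by summing the two strided slices [::2] and [1::2] and taking max; idiomatic, same cost.


-- ===== PORT A =====
-- the loop index i is always in range, so num_list[i] is pyGetD with an unused default
def solution (num_list : List Int) : Int :=
  let p := (PySem.List.pyRange 0 num_list.length 1).foldl
    (fun (p : Int × Int) i =>
      if PySem.Int.mod i 2 == 0 then (p.1 + PySem.List.pyGetD num_list i 0, p.2)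
      else (p.1, p.2 + PySem.List.pyGetD num_list i 0)) (0, 0)
  if p.1 ≥ p.2 then p.1 else p.2

-- ===== PORT B =====
-- a slice with step 2 never fails (step ≠ 0), so the .getD [] default is unused
def solution_alt (num_list : List Int) : Int :=
  let even := ((PySem.List.slice? num_list none none 2).getD []).sum
  let odd := ((PySem.List.slice? num_list (some 1) none 2).getD []).sum
  max even odd

-- ===== PRECONDITION & SPEC =====
def Spec_solution (num_list : List Int) (out : Int) : Prop := out = solution_alt num_list
instance (num_list : List Int) (out : Int) : Decidable (Spec_solution num_list out) := by unfold Spec_solution; infer_instance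

-- ===== CLAIM (what is proved, stated in full; the proofs are below) =====
def Claim_equal_solution : Prop := ∀ (num_list : List Int), Dom_solution num_list → Spec_solution num_list (solution num_list)

-- ===== LEMMAS AND PROOFS =====

-- the even-index and odd-index sublists of a list, by structural recursion
def pvSplit2 : List Int → List Int × List Int
  | [] => ([], [])
  | x :: l => (x :: (pvSplit2 l).2, (pvSplit2 l).1)

theorem pvModBeq (k : Nat) : (PySem.Int.mod (k:Int) 2 == 0) = decide (k % 2 = 0) := by
  simp only [PySem.Int.mod, Int.fmod_eq_emod]
  have h : ((k:Int) % 2 + if (0:Int) ≤ 2 ∨ (2:Int) ∣ (k:Int) then 0 else 2) = (k:Int) % 2 := by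
    simp
  rw [h]
  rcases Int.emod_two_eq_zero_or_one (k:Int) with h2 | h2 <;> rw [h2] <;>
    simp <;> omega

-- A's range-fold on x :: l, restricted to indices ≥ 1, is the fold on l with the pair swapped
theorem pvSwapFoldL (l : List Int) (L : List Nat) (p : Int × Int) :
    L.foldl (fun (q : Int × Int) (k : Nat) =>
      (if PySem.Int.mod (k:Int) 2 == 0 then (q.swap.1 + PySem.List.pyGetD l (k:Int) 0, q.swap.2)
       else (q.swap.1, q.swap.2 + PySem.List.pyGetD l (k:Int) 0)).swap) p
    = Prod.swap (L.foldl (fun (p : Int × Int) (k : Nat) =>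
        if PySem.Int.mod (k:Int) 2 == 0 then (p.1 + PySem.List.pyGetD l (k:Int) 0, p.2)
        else (p.1, p.2 + PySem.List.pyGetD l (k:Int) 0)) (Prod.swap p)) := by
  induction L generalizing p with
  | nil => simp
  | cons a L ih =>
    simp only [List.foldl_cons, ih]
    split <;> simp

-- A's loop computes the sums of the two alternating sublists
theorem pvFoldN (xs : List Int) (e o : Int) :
    (List.range xs.length).foldl
      (fun (p : Int × Int) (k : Nat) =>
        if PySem.Int.mod (k:Int) 2 == 0 then (p.1 + PySem.List.pyGetD xs (k:Int) 0, p.2)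
        else (p.1, p.2 + PySem.List.pyGetD xs (k:Int) 0)) (e, o)
    = (e + (pvSplit2 xs).1.sum, o + (pvSplit2 xs).2.sum) := by
  induction xs generalizing e o with
  | nil => simp [pvSplit2]
  | cons x l ih =>
    rw [List.length_cons, List.range_succ_eq_map, List.foldl_cons, List.foldl_map]
    have h0 : (if PySem.Int.mod ((0:Nat):Int) 2 == 0 then
        (e + PySem.List.pyGetD (x::l) ((0:Nat):Int) 0, o)
        else (e, o + PySem.List.pyGetD (x::l) ((0:Nat):Int) 0)) = (e + x, o) := by
      rw [pvModBeq]
      simp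
    have hbody : (fun (p : Int × Int) (k : Nat) =>
        if PySem.Int.mod ((Nat.succ k : Nat):Int) 2 == 0 then
          (p.1 + PySem.List.pyGetD (x::l) ((Nat.succ k : Nat):Int) 0, p.2)
        else (p.1, p.2 + PySem.List.pyGetD (x::l) ((Nat.succ k : Nat):Int) 0))
        = (fun (q : Int × Int) (k : Nat) => Prod.swap (
            (fun (p : Int × Int) (k : Nat) =>
              if PySem.Int.mod (k:Int) 2 == 0 then (p.1 + PySem.List.pyGetD l (k:Int) 0, p.2)
              else (p.1, p.2 + PySem.List.pyGetD l (k:Int) 0)) (Prod.swap q) k)) := by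
      funext p k
      simp only [Nat.succ_eq_add_one, pvModBeq, PySem.List.pyGetD_natCast,
        List.getD_cons_succ]
      by_cases hk : k % 2 = 0
      · have : (k+1) % 2 ≠ 0 := by omega
        simp [hk, this]
      · have : (k+1) % 2 = 0 := by omega
        simp [hk, this]
    norm_num only at h0 hbody ⊢
    rw [h0, hbody, pvSwapFoldL, ih]
    simp [pvSplit2]
    ring_nf

-- Python xs[::2] is the even-index sublist, xs[1::2] the odd-index one
theorem pvEO (xs : List Int) :
    (List.range ((xs.length+1)/2)).filterMap (fun k => xs[2*k]?) = (pvSplit2 xs).1 ∧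
    (List.range (xs.length/2)).filterMap (fun k => xs[2*k+1]?) = (pvSplit2 xs).2 := by
  induction xs with
  | nil => simp [pvSplit2]
  | cons x l ih =>
    constructor
    · have hc : (l.length + 1 + 1) / 2 = l.length / 2 + 1 := by omega
      simp only [List.length_cons, hc, List.range_succ_eq_map, List.filterMap_cons,
        List.filterMap_map]
      have hf : ∀ k : Nat, ((x :: l)[2 * Nat.succ k]? ) = l[2*k+1]? := by
        intro k
        have h2 : 2 * Nat.succ k = (2*k+1)+1 := by omega
        rw [h2, List.getElem?_cons_succ]
      simp only [Function.comp_def, hf]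
      simpa [pvSplit2] using ih.2
    · have hf : ∀ k : Nat, ((x :: l)[2*k+1]? ) = l[2*k]? := by
        intro k; rw [List.getElem?_cons_succ]
      simp only [List.length_cons, hf]
      simpa [pvSplit2] using ih.1

theorem pvSliceE (xs : List Int) :
    PySem.List.slice? xs none none 2 = some ((pvSplit2 xs).1) := by
  simp only [PySem.List.slice?, PySem.List.sliceIndices]
  simp only [show ¬((2:Int) = 0) by norm_num, if_false, show ¬((2:Int) < 0) by norm_num]
  have hcnt : (if (0:Int) < 2 then if (0:Int) < (xs.length:Int) then (((xs.length:Int) - 0 + 2 - 1)/2).toNat else 0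
      else if (xs.length:Int) < 0 then ((0 - (xs.length:Int) + -2 - 1)/(-2)).toNat else 0) = (xs.length+1)/2 := by
    simp only [show ((0:Int) < 2) = True by simp, if_true]
    split <;> omega
  rw [hcnt]
  simp only [show ∀ k:Nat, ((0:Int)+2*(k:Int)).toNat = 2*k from fun k => by omega]
  exact congrArg some (pvEO xs).1

theorem pvSliceO (xs : List Int) :
    PySem.List.slice? xs (some 1) none 2 = some ((pvSplit2 xs).2) := by
  cases xs with
  | nil => simp [PySem.List.slice?, PySem.List.sliceIndices, pvSplit2]
  | cons x l =>
    simp only [PySem.List.slice?, PySem.List.sliceIndices]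
    simp only [show ¬((2:Int) = 0) by norm_num, if_false, show ¬((2:Int) < 0) by norm_num,
      show ¬((1:Int) < 0) by norm_num]
    have hmin : min (1:Int) (((x::l).length:Int)) = 1 := by
      simp only [List.length_cons]; omega
    rw [hmin]
    have hcnt : (if (0:Int) < 2 then if (1:Int) < (((x::l).length:Int)) then ((((x::l).length:Int) - 1 + 2 - 1)/2).toNat else 0
        else if (((x::l).length:Int)) < 1 then ((1 - (((x::l).length:Int)) + -2 - 1)/(-2)).toNat else 0) = (x::l).length/2 := by
      simp only [show ((0:Int) < 2) = True by simp, if_true]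
      split <;> omega
    rw [hcnt]
    simp only [show ∀ k:Nat, ((1:Int)+2*(k:Int)).toNat = 2*k+1 from fun k => by omega]
    exact congrArg some (pvEO (x::l)).2

-- ===== VERDICT (by name: the statement is the Claim_ definition above) =====
theorem solution_spec : Claim_equal_solution := by
  intro xs _
  unfold Spec_solution solution solution_alt
  rw [pvSliceE, pvSliceO]
  rw [PySem.List.pyRange_one]
  simp only [sub_zero, Int.toNat_natCast, zero_add, List.foldl_map, Option.getD_some]
  rw [pvFoldN]
  simp only [zero_add]
  split <;> omega
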